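-- pv_equiv track=rewrite | github.com/kis619/SoftUni_Python_Fundamentals | 5.Text_processing/Exercise/07. String Explosion.py | check_for_digits
-- ===== SOURCE A (Python) =====
-- def check_for_digits(given_word, current_position):
--     number_as_string = 0
--     for positionn in range(current_position + 1, len(given_word)):
--         if given_word[positionn].isdigit():
--             number_as_string += int(given_word[positionn])
--         if not positionn == len(given_word) - 1:
--             if given_word[positionn] == ">" or given_word[positionn + 1] == ">":
--                 break
--
--     return int(number_as_string)
-- ===== SOURCE B (Python) =====
-- def check_for_digits(given_word, current_position):
--     n = len(given_word)
--     start = current_position + 1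
--     # pass 1: find the boundary index after which the original loop stops
--     boundary = n
--     for p in range(start, n):
--         if p != n - 1 and (given_word[p] == ">" or given_word[p + 1] == ">"):
--             boundary = p + 1  # index p itself is still counted
--             break
--     # pass 2: sum the digits over the index range [start, boundary)
--     return sum(int(given_word[p]) for p in range(start, boundary) if given_word[p].isdigit())
-- ===== Notes on version B (the rewrite author's own statement) =====
-- stated objective: alternative
-- what changed: A's single loop that accumulates a digit sum while testing an inline break is replaced by two separate passes: one that only locates the '>' boundary index, and a second generator-sum over the index range up to that boundary.
import Mathlib
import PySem

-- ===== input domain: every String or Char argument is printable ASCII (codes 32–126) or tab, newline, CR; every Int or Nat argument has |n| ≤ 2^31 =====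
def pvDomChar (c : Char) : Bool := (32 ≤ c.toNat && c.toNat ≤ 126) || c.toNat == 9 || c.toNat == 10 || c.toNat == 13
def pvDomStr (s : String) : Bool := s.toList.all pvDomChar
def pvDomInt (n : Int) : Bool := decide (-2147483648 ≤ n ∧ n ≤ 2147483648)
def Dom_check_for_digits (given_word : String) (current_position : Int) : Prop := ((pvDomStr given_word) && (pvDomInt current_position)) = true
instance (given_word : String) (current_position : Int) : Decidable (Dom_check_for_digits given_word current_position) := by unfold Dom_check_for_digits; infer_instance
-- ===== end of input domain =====

-- B replaces A's single loop with break by two passes (find the '>' boundary, then sum the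
-- digits over the index range); objective: alternative decomposition, same cost.

-- shared helpers corresponding to Python's given_word[i], c.isdigit(), int(c)
-- (pvGet's default ' ' is never reached under Pre_: the index is always in range there)
def pvGet (s : String) (i : Int) : Char := (PySem.Str.pyGet? s i).getD ' '
-- exact for the ASCII domain: Python's str.isdigit on ASCII is '0'..'9'
def pvIsDigit (c : Char) : Bool := decide ('0' ≤ c) && decide (c ≤ '9')
-- exact for a single ASCII digit char: int(c) = code - 48
def pvDigitVal (c : Char) : Int := (c.toNat : Int) - 48

-- ===== PORT A =====
def check_for_digits_loop (s : String) (n : Int) : List Int → Int → Int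
  | [], acc => acc
  | p :: rest, acc =>
    let acc' := if pvIsDigit (pvGet s p) then acc + pvDigitVal (pvGet s p) else acc
    if p = n - 1 then check_for_digits_loop s n rest acc'
    else
      if pvGet s p = '>' ∨ pvGet s (p + 1) = '>' then acc'
      else check_for_digits_loop s n rest acc'

def check_for_digits (given_word : String) (current_position : Int) : Int :=
  check_for_digits_loop given_word (PySem.Str.len given_word)
    (PySem.List.pyRange (current_position + 1) (PySem.Str.len given_word) 1) 0

-- ===== PORT B =====
def pvBoundary (s : String) (n : Int) : List Int → Int
  | [] => n
  | p :: rest =>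
    if p ≠ n - 1 ∧ (pvGet s p = '>' ∨ pvGet s (p + 1) = '>') then p + 1
    else pvBoundary s n rest

def check_for_digits_alt (given_word : String) (current_position : Int) : Int :=
  let n := PySem.Str.len given_word
  let start := current_position + 1
  let boundary := pvBoundary given_word n (PySem.List.pyRange start n 1)
  (((PySem.List.pyRange start boundary 1).filter
      (fun p => pvIsDigit (pvGet given_word p))).map
    (fun p => pvDigitVal (pvGet given_word p))).sum

-- ===== PRECONDITION & SPEC =====
-- Pre_ excludes exactly the inputs where Python A raises IndexError (the first index
-- current_position+1 below -len(given_word)); B raises there too.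
def Pre_check_for_digits (given_word : String) (current_position : Int) : Prop :=
  -(PySem.Str.len given_word) ≤ current_position + 1
instance (given_word : String) (current_position : Int) : Decidable (Pre_check_for_digits given_word current_position) := by unfold Pre_check_for_digits; infer_instance

def pvWitness_check_for_digits : String × Int := ("a1>2b", 0)

def Spec_check_for_digits (given_word : String) (current_position : Int) (out : Int) : Prop := out = check_for_digits_alt given_word current_position
instance (given_word : String) (current_position : Int) (out : Int) : Decidable (Spec_check_for_digits given_word current_position out) := by unfold Spec_check_for_digits; infer_instance

-- ===== CLAIM (what is proved, stated in full; the proofs are below) =====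
def Claim_equal_check_for_digits : Prop := ∀ (given_word : String) (current_position : Int), Dom_check_for_digits given_word current_position → Pre_check_for_digits given_word current_position → Spec_check_for_digits given_word current_position (check_for_digits given_word current_position)

-- ===== LEMMAS AND PROOFS =====

-- the digit contribution of one index and the partial sum B takes over a range
def pvContrib (s : String) (p : Int) : Int :=
  if pvIsDigit (pvGet s p) then pvDigitVal (pvGet s p) else 0

def pvSum (s : String) (a b : Int) : Int :=
  (((PySem.List.pyRange a b 1).filter (fun p => pvIsDigit (pvGet s p))).map
    (fun p => pvDigitVal (pvGet s p))).sum

lemma pvSum_empty (s : String) (a b : Int) (h : b ≤ a) : pvSum s a b = 0 := by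
  simp [pvSum, PySem.List.pyRange_one_eq_nil h]

lemma pvSum_cons (s : String) (a b : Int) (h : a < b) :
    pvSum s a b = pvContrib s a + pvSum s (a + 1) b := by
  unfold pvSum pvContrib
  rw [PySem.List.pyRange_one_cons h]
  by_cases hd : pvIsDigit (pvGet s a) <;> simp [hd]

lemma pvLoop_cons (s : String) (n : Int) (p : Int) (rest : List Int) (acc : Int) :
    check_for_digits_loop s n (p :: rest) acc
      = (let acc' := if pvIsDigit (pvGet s p) then acc + pvDigitVal (pvGet s p) else acc
         if p = n - 1 then check_for_digits_loop s n rest acc'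
         else
           if pvGet s p = '>' ∨ pvGet s (p + 1) = '>' then acc'
           else check_for_digits_loop s n rest acc') := rfl

lemma pvBoundary_cons (s : String) (n : Int) (p : Int) (rest : List Int) :
    pvBoundary s n (p :: rest)
      = if p ≠ n - 1 ∧ (pvGet s p = '>' ∨ pvGet s (p + 1) = '>') then p + 1
        else pvBoundary s n rest := rfl

lemma pvBoundary_bounds (s : String) (n : Int) :
    ∀ (k : Nat) (a : Int), (n - a).toNat = k → a ≤ n →
      a ≤ pvBoundary s n (PySem.List.pyRange a n 1) ∧
      pvBoundary s n (PySem.List.pyRange a n 1) ≤ n := by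
  intro k
  induction k with
  | zero =>
    intro a hk ha
    have : n ≤ a := by omega
    rw [PySem.List.pyRange_one_eq_nil this]
    simp [pvBoundary]; omega
  | succ m ih =>
    intro a hk ha
    have hlt : a < n := by omega
    rw [PySem.List.pyRange_one_cons hlt]
    unfold pvBoundary
    split
    · constructor <;> omega
    · have := ih (a + 1) (by omega) (by omega)
      constructor <;> omega

lemma pvLoop_eq_sum (s : String) (n : Int) :
    ∀ (k : Nat) (a acc : Int), (n - a).toNat = k →
      check_for_digits_loop s n (PySem.List.pyRange a n 1) acc
        = acc + pvSum s a (pvBoundary s n (PySem.List.pyRange a n 1)) := by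
  intro k
  induction k with
  | zero =>
    intro a acc hk
    have hna : n ≤ a := by omega
    rw [PySem.List.pyRange_one_eq_nil hna]
    simp [check_for_digits_loop, pvBoundary, pvSum_empty s a n hna]
  | succ m ih =>
    intro a acc hk
    have hlt : a < n := by omega
    rw [PySem.List.pyRange_one_cons hlt]
    have hacc' : (if pvIsDigit (pvGet s a) then acc + pvDigitVal (pvGet s a) else acc)
        = acc + pvContrib s a := by
      unfold pvContrib; by_cases hd : pvIsDigit (pvGet s a) <;> simp [hd]
    by_cases hcond : a ≠ n - 1 ∧ (pvGet s a = '>' ∨ pvGet s (a + 1) = '>')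
    · -- the loop breaks after processing index a; boundary = a + 1
      have hA : check_for_digits_loop s n (a :: PySem.List.pyRange (a + 1) n 1) acc
          = acc + pvContrib s a := by
        rw [pvLoop_cons]
        simp only []
        rw [if_neg hcond.1, if_pos hcond.2]
        exact hacc'
      have hB : pvBoundary s n (a :: PySem.List.pyRange (a + 1) n 1) = a + 1 := by
        rw [pvBoundary_cons, if_pos hcond]
      rw [hA, hB, pvSum_cons s a (a + 1) (by omega), pvSum_empty s (a + 1) (a + 1) le_rfl]
      ring
    · -- no break at index a: both sides continue with the tail
      have hB : pvBoundary s n (a :: PySem.List.pyRange (a + 1) n 1)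
          = pvBoundary s n (PySem.List.pyRange (a + 1) n 1) := by
        rw [pvBoundary_cons, if_neg hcond]
      have hbnd := pvBoundary_bounds s n m (a + 1) (by omega) (by omega)
      have hA : check_for_digits_loop s n (a :: PySem.List.pyRange (a + 1) n 1) acc
          = check_for_digits_loop s n (PySem.List.pyRange (a + 1) n 1) (acc + pvContrib s a) := by
        rw [pvLoop_cons]
        simp only []
        by_cases hlast : a = n - 1
        · rw [if_pos hlast, hacc']
        · rw [if_neg hlast]
          have hgt : ¬ (pvGet s a = '>' ∨ pvGet s (a + 1) = '>') := by
            intro hor; exact hcond ⟨hlast, hor⟩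
          rw [if_neg hgt, hacc']
      rw [hA, ih (a + 1) (acc + pvContrib s a) (by omega), hB,
        pvSum_cons s a _ (by omega)]
      ring

-- ===== VERDICT (by name: the statement is the Claim_ definition above) =====
theorem check_for_digits_spec : Claim_equal_check_for_digits := by
  intro s cp _ _
  unfold Spec_check_for_digits check_for_digits check_for_digits_alt
  rw [pvLoop_eq_sum s (PySem.Str.len s)
    ((PySem.Str.len s) - (cp + 1)).toNat (cp + 1) 0 rfl]
  simp [pvSum]
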